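-- pv_equiv track=rewrite | github.com/Skifskii/kispython_mirea | edu/5_1.py | f
-- ===== SOURCE A (Python) =====
-- from math import ceil
--
-- def f(z, x, y):
--     z = [0] + z
--     x = [0] + x
--     y = [0] + y
--
--     summa = 0
--     for i in range(1, len(x)):
--         summa += (24 * x[ceil(i / 4)] + z[ceil(i / 4)] ** 2 + 48 * y[i] ** 3) ** 7
--     return summa
-- ===== SOURCE B (Python) =====
-- def f(z, x, y):
--     n = len(x)
--     g = -(-n // 4)
--     total = 0
--     for j in range(1, g + 1):
--         base = 24 * x[j - 1] + z[j - 1] ** 2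
--         for i in range(4 * (j - 1) + 1, min(4 * j, n) + 1):
--             total += (base + 48 * y[i - 1] ** 3) ** 7
--     return total
-- ===== Notes on version B (the rewrite author's own statement) =====
-- stated objective: alternative
-- what changed: Instead of recomputing ceil(i/4) and the shared 24*x[..] + z[..]**2 subexpression for every index, B iterates over groups of four indices, computing the group's base value once and summing only y-dependent terms inside each group.
import Mathlib
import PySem

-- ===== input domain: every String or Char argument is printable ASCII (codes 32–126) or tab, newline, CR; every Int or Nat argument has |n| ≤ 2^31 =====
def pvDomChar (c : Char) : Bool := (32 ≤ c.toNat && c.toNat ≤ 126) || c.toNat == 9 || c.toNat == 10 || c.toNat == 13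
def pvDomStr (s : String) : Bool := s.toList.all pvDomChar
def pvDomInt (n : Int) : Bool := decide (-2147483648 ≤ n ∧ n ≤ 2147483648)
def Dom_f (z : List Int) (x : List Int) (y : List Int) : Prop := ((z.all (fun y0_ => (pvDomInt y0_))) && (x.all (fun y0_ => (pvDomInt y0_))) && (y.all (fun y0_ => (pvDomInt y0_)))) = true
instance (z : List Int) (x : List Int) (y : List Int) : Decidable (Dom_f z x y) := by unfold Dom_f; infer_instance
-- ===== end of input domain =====

-- B computes each group's shared quantity 24*x[j] + z[j]**2 once per group of four indices
-- instead of re-deriving ceil(i/4) and that quantity for every i (alternative decomposition).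

-- ===== PORT A =====
-- math.ceil(i/4) for the int i; exact for |i| ≤ 2^31 (float i/4 is exact there); here 1 ≤ i.
def ceil4 (i : Int) : Int := -(PySem.Int.floordiv (-i) 4)

-- Indexing uses pyGetD with default 0: under Pre_f every index is in range, so this agrees
-- with Python's xs[k] exactly (outside Pre_f Python raises IndexError).
def f (z : List Int) (x : List Int) (y : List Int) : Int :=
  let z1 := 0 :: z
  let x1 := 0 :: x
  let y1 := 0 :: y
  (PySem.List.pyRange 1 (PySem.List.len x1) 1).foldl
    (fun summa i =>
      summa + (24 * PySem.List.pyGetD x1 (ceil4 i) 0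
        + (PySem.List.pyGetD z1 (ceil4 i) 0) ^ 2
        + 48 * (PySem.List.pyGetD y1 i 0) ^ 3) ^ 7) 0

-- ===== PORT B =====
def f_alt (z : List Int) (x : List Int) (y : List Int) : Int :=
  let n : Int := PySem.List.len x
  let g : Int := -(PySem.Int.floordiv (-n) 4)
  (PySem.List.pyRange 1 (g + 1) 1).foldl
    (fun total j =>
      let base := 24 * PySem.List.pyGetD x (j - 1) 0 + (PySem.List.pyGetD z (j - 1) 0) ^ 2
      (PySem.List.pyRange (4 * (j - 1) + 1) (min (4 * j) n + 1) 1).foldl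
        (fun total i => total + (base + 48 * (PySem.List.pyGetD y (i - 1) 0) ^ 3) ^ 7) total)
    0

-- ===== PRECONDITION & SPEC =====
-- Pre_f excludes exactly the inputs where the Python A raises IndexError:
-- z must reach index ceil(len(x)/4) and y must reach index len(x) (after the [0]-prepend).
def Pre_f (z : List Int) (x : List Int) (y : List Int) : Prop :=
  (x.length + 3) / 4 ≤ z.length ∧ x.length ≤ y.length
instance (z : List Int) (x : List Int) (y : List Int) : Decidable (Pre_f z x y) := by unfold Pre_f; infer_instance
def pvWitness_f : List Int × List Int × List Int := ([3, -2], [1, 2, 3, 4, 5], [2, 0, -1, 7, 4])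

def Spec_f (z : List Int) (x : List Int) (y : List Int) (out : Int) : Prop := out = f_alt z x y
instance (z : List Int) (x : List Int) (y : List Int) (out : Int) : Decidable (Spec_f z x y out) := by unfold Spec_f; infer_instance

-- ===== CLAIM (what is proved, stated in full; the proofs are below) =====
def Claim_equal_f : Prop := ∀ (z : List Int) (x : List Int) (y : List Int), Dom_f z x y → Pre_f z x y → Spec_f z x y (f z x y)

-- ===== LEMMAS AND PROOFS =====

-- Shifting a [0]-prepended list: index j ≥ 1 into (0 :: xs) is index j-1 into xs.
theorem pyGetD_cons_shift (a : Int) (xs : List Int) (j : Int) (d : Int) (hj : 1 ≤ j) :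
    PySem.List.pyGetD (a :: xs) j d = PySem.List.pyGetD xs (j - 1) d := by
  rw [PySem.List.pyGetD_of_nonneg _ _ (by omega : (0:Int) ≤ j),
     PySem.List.pyGetD_of_nonneg _ _ (by omega : (0:Int) ≤ j - 1)]
  have h : j.toNat = (j - 1).toNat + 1 := by omega
  rw [h]
  rfl

-- ceil(i/4) = j exactly on the j-th group 4(j-1)+1 ≤ i ≤ 4j.
theorem ceil4_eq (i j : Int) (h1 : 4 * (j - 1) + 1 ≤ i) (h2 : i ≤ 4 * j) : ceil4 i = j := by
  unfold ceil4
  rw [PySem.Int.neg_floordiv_neg_eq_iff_of_pos (by norm_num)]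
  omega

-- The grouped index ranges of B concatenate to A's single range 1..n.
theorem flatMap_groups (t : Int → Int) (g : Nat) :
    ∀ n : Int, 4 * (g : Int) - 4 < n → n ≤ 4 * g →
    (PySem.List.pyRange 1 ((g : Int) + 1) 1).flatMap
        (fun j => (PySem.List.pyRange (4 * (j - 1) + 1) (min (4 * j) n + 1) 1).map t)
      = (PySem.List.pyRange 1 (n + 1) 1).map t := by
  induction g with
  | zero =>
      intro n h1 h2
      rw [PySem.List.pyRange_one_eq_nil (by omega), PySem.List.pyRange_one_eq_nil (by omega)]
      rfl
  | succ g ih =>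
      intro n h1 h2
      have hsplit : PySem.List.pyRange 1 (((g : Nat) + 1 : Nat) + 1 : Int) 1
          = PySem.List.pyRange 1 ((g : Int) + 1) 1 ++ [((g : Nat) + 1 : Int)] := by
        have := PySem.List.pyRange_one_succ_right (a := 1) (b := (g : Int) + 1) (by omega)
        push_cast
        push_cast at this
        convert this using 2
      push_cast at hsplit ⊢
      rw [hsplit, List.flatMap_append]
      have hcong : (PySem.List.pyRange 1 ((g : Int) + 1) 1).flatMap
            (fun j => (PySem.List.pyRange (4 * (j - 1) + 1) (min (4 * j) n + 1) 1).map t)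
          = (PySem.List.pyRange 1 ((g : Int) + 1) 1).flatMap
            (fun j => (PySem.List.pyRange (4 * (j - 1) + 1) (min (4 * j) (4 * (g : Int)) + 1) 1).map t) := by
        apply List.flatMap_congr
        intro j hj
        rw [PySem.List.mem_pyRange_one] at hj
        have : min (4 * j) n = min (4 * j) (4 * (g : Int)) := by omega
        rw [this]
      rw [hcong, ih (4 * (g : Int)) (by omega) (by omega)]
      have hlast : (PySem.List.pyRange (4 * (((g : Int) + 1) - 1) + 1) (min (4 * ((g : Int) + 1)) n + 1) 1)
          = PySem.List.pyRange (4 * (g : Int) + 1) (n + 1) 1 := by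
        have h3 : min (4 * ((g : Int) + 1)) n = n := by omega
        rw [h3]; ring_nf
      simp only [List.flatMap_cons, List.flatMap_nil, List.append_nil]
      rw [hlast, ← List.map_append, ← PySem.List.pyRange_one_append 1 (4 * (g : Int) + 1) (n + 1) (by omega) (by omega)]

theorem f_eq_sum (z x y : List Int) :
    f z x y = ((PySem.List.pyRange 1 ((x.length : Int) + 1) 1).map
      (fun i => (24 * PySem.List.pyGetD (0 :: x) (ceil4 i) 0
        + (PySem.List.pyGetD (0 :: z) (ceil4 i) 0) ^ 2
        + 48 * (PySem.List.pyGetD (0 :: y) i 0) ^ 3) ^ 7)).sum := by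
  show ((PySem.List.pyRange 1 (PySem.List.len (0 :: x)) 1).foldl _ 0) = _
  rw [PySem.List.foldl_add]
  simp [PySem.List.len]

-- sum of per-group sums = sum over the concatenation (no Mathlib lemma in this direction found)
theorem sum_map_sum_eq_sum_flatMap (l : List Int) (g : Int → List Int) :
    (l.map (fun a => (g a).sum)).sum = (l.flatMap g).sum := by
  induction l with
  | nil => rfl
  | cons a l ih => simp [ih]

theorem f_alt_eq_sum (z x y : List Int) :
    f_alt z x y = ((PySem.List.pyRange 1 (-(PySem.Int.floordiv (-(x.length : Int)) 4) + 1) 1).flatMap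
      (fun j => (PySem.List.pyRange (4 * (j - 1) + 1) (min (4 * j) (x.length : Int) + 1) 1).map
        (fun i => (24 * PySem.List.pyGetD x (j - 1) 0 + (PySem.List.pyGetD z (j - 1) 0) ^ 2
          + 48 * (PySem.List.pyGetD y (i - 1) 0) ^ 3) ^ 7))).sum := by
  show ((PySem.List.pyRange 1 _ 1).foldl _ 0) = _
  simp only [PySem.List.foldl_add, PySem.List.len_eq]
  rw [sum_map_sum_eq_sum_flatMap]
  simp

-- ===== VERDICT (by name: the statement is the Claim_ definition above) =====
theorem f_spec : Claim_equal_f := by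
  intro z x y _ _
  unfold Spec_f
  rw [f_eq_sum, f_alt_eq_sum]
  set n : Int := (x.length : Int) with hn
  have hg : -(PySem.Int.floordiv (-n) 4) = (((x.length + 3) / 4 : Nat) : Int) := by
    rw [PySem.Int.neg_floordiv_neg_eq_iff_of_pos (by norm_num)]
    omega
  rw [hg]
  have hc : (PySem.List.pyRange 1 ((((x.length + 3) / 4 : Nat) : Int) + 1) 1).flatMap
      (fun j => (PySem.List.pyRange (4 * (j - 1) + 1) (min (4 * j) n + 1) 1).map
        (fun i => (24 * PySem.List.pyGetD x (j - 1) 0 + (PySem.List.pyGetD z (j - 1) 0) ^ 2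
          + 48 * (PySem.List.pyGetD y (i - 1) 0) ^ 3) ^ 7))
      = (PySem.List.pyRange 1 ((((x.length + 3) / 4 : Nat) : Int) + 1) 1).flatMap
      (fun j => (PySem.List.pyRange (4 * (j - 1) + 1) (min (4 * j) n + 1) 1).map
        (fun i => (24 * PySem.List.pyGetD (0 :: x) (ceil4 i) 0
          + (PySem.List.pyGetD (0 :: z) (ceil4 i) 0) ^ 2
          + 48 * (PySem.List.pyGetD (0 :: y) i 0) ^ 3) ^ 7)) := by
    apply List.flatMap_congr
    intro j hj
    rw [PySem.List.mem_pyRange_one] at hj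
    apply List.map_congr_left
    intro i hi
    rw [PySem.List.mem_pyRange_one] at hi
    have hcj : ceil4 i = j := ceil4_eq i j (by omega) (by omega)
    rw [hcj, pyGetD_cons_shift _ _ j _ (by omega), pyGetD_cons_shift _ _ j _ (by omega),
        pyGetD_cons_shift _ _ i _ (by omega)]
  rw [hc, flatMap_groups _ ((x.length + 3) / 4) n (by omega) (by omega)]
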